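-- pv_equiv track=rewrite | github.com/tmcginness/mma-value-finder | features/feature_engineering.py | _current_streak
-- ===== SOURCE A (Python) =====
-- def _current_streak(fight_list: list[dict]) -> int:
--     """Count current win (positive) or loss (negative) streak."""
--     if not fight_list:
--         return 0
--
--     streak = 0
--     last_result = fight_list[-1]["won"]
--
--     for f in reversed(fight_list):
--         if f["won"] == last_result:
--             streak += 1
--         else:
--             break
--
--     return streak if last_result == 1 else -streak
-- ===== SOURCE B (Python) =====
-- def _current_streak(fight_list):
--     """Count current win (positive) or loss (negative) streak."""
--     if not fight_list:
--         return 0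
--     # single forward pass: run-length encode the "won" sequence, then read the last run
--     runs = []
--     for f in fight_list:
--         v = f["won"]
--         if runs and runs[-1][0] == v:
--             runs[-1][1] += 1
--         else:
--             runs.append([v, 1])
--     last_result, streak = runs[-1]
--     return streak if last_result == 1 else -streak
-- ===== Notes on version B (the rewrite author's own statement) =====
-- stated objective: alternative
-- what changed: B makes one forward pass building the run-length encoding of the 'won' sequence and reads the sign/length off the last run, instead of A's backward scan with an early break.
-- outside the precondition, e.g. on _current_streak([{'a': 0}, {'won': 0}, {'won': 1}]): A returns 1, B raises KeyError
import Mathlib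
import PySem

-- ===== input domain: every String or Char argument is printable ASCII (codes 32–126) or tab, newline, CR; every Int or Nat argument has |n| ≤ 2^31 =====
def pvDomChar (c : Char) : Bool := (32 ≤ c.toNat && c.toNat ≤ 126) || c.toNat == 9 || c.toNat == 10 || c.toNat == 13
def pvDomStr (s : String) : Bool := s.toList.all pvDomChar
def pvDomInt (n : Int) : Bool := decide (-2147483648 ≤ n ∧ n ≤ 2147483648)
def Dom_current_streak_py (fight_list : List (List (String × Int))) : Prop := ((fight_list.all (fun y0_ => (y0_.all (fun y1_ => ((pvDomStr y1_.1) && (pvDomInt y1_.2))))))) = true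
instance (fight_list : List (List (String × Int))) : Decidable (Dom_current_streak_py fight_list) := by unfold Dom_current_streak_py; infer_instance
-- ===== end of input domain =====

-- B builds the run-length encoding of the "won" sequence in one forward pass and reads the last run,
-- instead of A's backward scan with an early break; same cost, different decomposition.

-- ===== PORT A =====
-- for f in reversed(fight_list): if f["won"] == last_result: streak += 1 else: break
-- f["won"] lookup: missing key is a Python KeyError, excluded by Pre_; the getD 0 default is never the claimed value.
def streakLoopA (last : Int) : List (List (String × Int)) → Int → Int
  | [], streak => streak
  | f :: rest, streak =>
      if (PySem.Dict.get? (PySem.Dict.mk f) "won").getD 0 = last then streakLoopA last rest (streak + 1)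
      else streak

def current_streak_py (fight_list : List (List (String × Int))) : Int :=
  if fight_list = [] then 0
  else
    match fight_list.getLast? with
    | none => 0   -- unreachable: list nonempty
    | some lastF =>
        let last_result := (PySem.Dict.get? (PySem.Dict.mk lastF) "won").getD 0  -- KeyError excluded by Pre_
        let streak := streakLoopA last_result fight_list.reverse 0
        if last_result = 1 then streak else -streak

-- ===== PORT B =====
-- one iteration of B's loop body: extend or start the trailing run
def addRun (runs : List (Int × Int)) (v : Int) : List (Int × Int) :=
  match runs.getLast? with
  | some (r, c) => if r = v then runs.dropLast ++ [(r, c + 1)] else runs ++ [(v, 1)]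
  | none => [(v, 1)]

def bLoop : List (List (String × Int)) → List (Int × Int) → List (Int × Int)
  | [], runs => runs
  | f :: rest, runs => bLoop rest (addRun runs ((PySem.Dict.get? (PySem.Dict.mk f) "won").getD 0))  -- KeyError excluded by Pre_

def current_streak_py_alt (fight_list : List (List (String × Int))) : Int :=
  if fight_list = [] then 0
  else
    match (bLoop fight_list []).getLast? with
    | none => 0   -- unreachable: runs nonempty when fight_list is
    | some (last_result, streak) => if last_result = 1 then streak else -streak

-- ===== PRECONDITION & SPEC =====
-- Pre_ excludes lists in which some fight dict lacks the key "won": Python A raises KeyError there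
-- unless its backward scan breaks before reaching the offending dict (on such inputs A still returns
-- a value but B's forward pass raises KeyError).
def Pre_current_streak_py (fight_list : List (List (String × Int))) : Prop :=
  ∀ f ∈ fight_list, (PySem.Dict.get? (PySem.Dict.mk f) "won").isSome = true
instance (fight_list : List (List (String × Int))) : Decidable (Pre_current_streak_py fight_list) := by
  unfold Pre_current_streak_py; infer_instance

def pvWitness_current_streak_py : (List (List (String × Int))) :=
  [[("won", 1)], [("won", 1)], [("won", 0)], [("won", 0)], [("won", 0)]]

def Spec_current_streak_py (fight_list : List (List (String × Int))) (out : Int) : Prop := out = current_streak_py_alt fight_list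
instance (fight_list : List (List (String × Int))) (out : Int) : Decidable (Spec_current_streak_py fight_list out) := by unfold Spec_current_streak_py; infer_instance

-- ===== CLAIM (what is proved, stated in full; the proofs are below) =====
def Claim_equal_current_streak_py : Prop := ∀ (fight_list : List (List (String × Int))), Dom_current_streak_py fight_list → Pre_current_streak_py fight_list → Spec_current_streak_py fight_list (current_streak_py fight_list)

-- ===== LEMMAS AND PROOFS =====

-- the value each port extracts from a fight dict
def valW (f : List (String × Int)) : Int := (PySem.Dict.get? (PySem.Dict.mk f) "won").getD 0

-- A's loop counts the length of the trailing run (takeWhile on the reversed value list)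
theorem streakLoopA_eq (last : Int) :
    ∀ (fights : List (List (String × Int))) (s : Int),
      streakLoopA last fights s = s + ((fights.map valW).takeWhile (fun x => x = last)).length := by
  intro fights
  induction fights with
  | nil => intro s; simp [streakLoopA]
  | cons f rest ih =>
      intro s
      by_cases h : valW f = last
      · simp [streakLoopA, valW] at h ⊢
        rw [if_pos h, ih, List.takeWhile_cons, if_pos (by simpa using h)]
        simp; ring
      · simp [streakLoopA, valW] at h ⊢
        rw [if_neg h, List.takeWhile_cons, if_neg (by simpa using h)]
        simp

-- B's loop is a fold of addRun over the value list
theorem bLoop_eq : ∀ (fights : List (List (String × Int))) (runs : List (Int × Int)),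
    bLoop fights runs = (fights.map valW).foldl addRun runs := by
  intro fights
  induction fights with
  | nil => intro runs; simp [bLoop]
  | cons f rest ih => intro runs; simp [bLoop, valW, List.map, ih]

-- the last run of the fold is (last value, 1 + length of the trailing run of the rest)
theorem foldl_addRun_last :
    ∀ (ys : List Int) (v : Int),
      ((ys ++ [v]).foldl addRun []).getLast?
        = some (v, 1 + ((ys.reverse.takeWhile (fun x => x = v)).length : Int)) := by
  intro ys
  induction ys using List.reverseRecOn with
  | nil => intro v; simp [addRun]
  | append_singleton zs w ih =>
      intro v
      have h1 : ((zs ++ [w]).foldl addRun []).getLast?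
          = some (w, 1 + ((zs.reverse.takeWhile (fun x => x = w)).length : Int)) := ih w
      rw [show zs ++ [w] ++ [v] = (zs ++ [w]) ++ [v] from rfl, List.foldl_append,
          List.foldl_cons, List.foldl_nil]
      simp only [addRun, h1]
      by_cases hwv : w = v
      · subst hwv
        simp
        ring
      · simp [hwv]

-- ===== VERDICT (by name: the statement is the Claim_ definition above) =====
theorem current_streak_py_spec : Claim_equal_current_streak_py := by
  intro fight_list _hDom _hPre
  unfold Spec_current_streak_py
  induction fight_list using List.reverseRecOn with
  | nil => rfl
  | append_singleton gs g _ =>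
      have hne : gs ++ [g] ≠ [] := by simp
      unfold current_streak_py current_streak_py_alt
      rw [if_neg hne, if_neg hne, List.getLast?_concat, bLoop_eq, List.map_append,
          List.map_cons, List.map_nil, foldl_addRun_last]
      simp only [streakLoopA_eq]
      have hrev : ((gs ++ [g]).reverse.map valW) = valW g :: (gs.map valW).reverse := by
        simp [List.map_reverse]
      rw [hrev]
      simp [valW]
      split_ifs <;> exact Int.add_comm _ _
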